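-- pv_equiv track=rewrite | github.com/YuantianDing/clifquo | test.py | generateSortPermutations
-- ===== SOURCE A (Python) =====
-- def generateSortPermutations(A):
--     # Step 1: Compute the sorted array B
--     B = sorted(A)
--
--     # Step 2: Build mapping: value -> list of indices in B
--     from collections import defaultdict
--     value_to_indices = defaultdict(list)
--     for index, value in enumerate(B):
--         value_to_indices[value].append(index)
--
--     result = []  # to store all valid index permutations
--
--     # backtracking helper
--     def backtrack(i, current_perm, used):
--         if i == len(A):
--             result.append(current_perm.copy())
--             return
--         value = A[i]
--         # Iterate over all candidate positions for A[i]
--         for pos in value_to_indices[value]: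
--             if pos not in used:
--                 used.add(pos)
--                 current_perm.append(pos)
--                 backtrack(i + 1, current_perm, used)
--                 current_perm.pop()
--                 used.remove(pos)
--
--     backtrack(0, [], set())
--     return result
-- ===== SOURCE B (Python) =====
-- def generateSortPermutations(A):
--     B = sorted(A)
--     n = len(A)
--     perms = [[]]
--     for v in A:
--         cand = [j for j in range(n) if B[j] == v]
--         perms = [p + [j] for p in perms for j in cand if j not in p]
--     return perms
-- ===== Notes on version B (the rewrite author's own statement) =====
-- stated objective: simpler
-- what changed: A's recursive backtracking with a value->indices defaultdict and a mutable used-set is replaced by a single left-to-right fold over A that extends each partial index permutation with every still-unused position of the sorted array holding the current value.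
import Mathlib
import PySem

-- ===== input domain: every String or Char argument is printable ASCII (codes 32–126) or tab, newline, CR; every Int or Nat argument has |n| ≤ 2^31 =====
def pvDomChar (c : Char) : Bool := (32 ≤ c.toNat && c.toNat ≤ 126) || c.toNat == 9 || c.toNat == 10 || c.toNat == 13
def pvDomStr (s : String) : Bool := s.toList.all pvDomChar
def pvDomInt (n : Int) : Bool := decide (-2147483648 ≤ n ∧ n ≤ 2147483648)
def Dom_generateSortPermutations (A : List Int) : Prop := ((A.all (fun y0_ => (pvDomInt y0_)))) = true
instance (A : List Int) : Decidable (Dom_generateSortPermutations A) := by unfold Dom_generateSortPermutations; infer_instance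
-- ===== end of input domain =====

-- B replaces A's recursive backtracking (grouping dict + used-set) by a single left-to-right fold
-- that extends every partial permutation with each still-free matching position (objective: simpler, same cost).

-- ===== PORT A =====
-- backtrack(i, current_perm, used): recursion on the remaining suffix A[i:]; the append/pop &
-- add/remove state restoration of the Python becomes passing the extended perm/used to the recursive call
def pvBT (vti : PySem.Dict Int (List Int)) : List Int → List Int → PySem.Set Int → List (List Int)
  | [], perm, _ => [perm]
  | v :: rest, perm, used =>
    (vti.getD v []).foldl
      (fun acc pos =>
        if PySem.Set.contains used pos then acc
        else acc ++ pvBT vti rest (perm ++ [pos]) (PySem.Set.add used pos)) []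

def generateSortPermutations (A : List Int) : List (List Int) :=
  let B := PySem.List.sorted A (fun x => x) false
  let vti := (PySem.List.enumerate B 0).foldl
      (fun d p => d.modify p.2 [] (fun l => l ++ [p.1])) PySem.Dict.empty
  pvBT vti A [] PySem.Set.empty

-- ===== PORT B =====
-- one loop step: cand = [j for j in range(n) if B[j] == v];
-- perms = [p + [j] for p in perms for j in cand if j not in p]
def pvStep (B : List Int) (n : Int) (perms : List (List Int)) (v : Int) : List (List Int) :=
  let cand := (PySem.List.pyRange 0 n 1).filter (fun j => PySem.List.pyGetD B j 0 == v)
  perms.flatMap (fun p =>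
    (cand.filter (fun j => !(p.contains j))).map (fun j => p ++ [j]))

def generateSortPermutations_alt (A : List Int) : List (List Int) :=
  let B := PySem.List.sorted A (fun x => x) false
  A.foldl (pvStep B (A.length : Int)) [[]]

-- ===== PRECONDITION & SPEC =====
def Spec_generateSortPermutations (A : List Int) (out : List (List Int)) : Prop := out = generateSortPermutations_alt A
instance (A : List Int) (out : List (List Int)) : Decidable (Spec_generateSortPermutations A out) := by unfold Spec_generateSortPermutations; infer_instance

-- ===== CLAIM (what is proved, stated in full; the proofs are below) =====
def Claim_equal_generateSortPermutations : Prop := ∀ (A : List Int), Dom_generateSortPermutations A → Spec_generateSortPermutations A (generateSortPermutations A)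

-- ===== LEMMAS AND PROOFS =====

-- A's grouping dict, built from enumerate(B), answers exactly the range-filter of B's comprehension
lemma pv_cand_eq (B : List Int) (v : Int) :
    ((PySem.List.enumerate B 0).foldl
        (fun d p => d.modify p.2 [] (fun l => l ++ [p.1])) PySem.Dict.empty).getD v []
      = (PySem.List.pyRange 0 (B.length : Int) 1).filter
          (fun j => PySem.List.pyGetD B j 0 == v) := by
  have h1 : (PySem.List.enumerate B 0).foldl
        (fun d p => d.modify p.2 [] (fun l => l ++ [p.1])) PySem.Dict.empty
      = ((PySem.List.enumerate B 0).map (fun p => (p.2, p.1))).foldl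
        (fun d q => d.modify q.1 [] (fun l => l ++ [q.2])) PySem.Dict.empty := by
    rw [List.foldl_map]
  rw [h1, PySem.Dict.getD_foldl_modify_append]
  rw [PySem.List.enumerate_eq_map_pyRange (d := 0)]
  simp [List.filter_map, List.map_map, Function.comp_def, PySem.List.len]

lemma pv_step_flatMap (B : List Int) (n : Int) (ps : List (List Int)) (v : Int) :
    pvStep B n ps v = ps.flatMap (fun p => pvStep B n [p] v) := by
  simp [pvStep]

-- B's fold is a flatMap of independent per-start folds
lemma pv_foldl_step_flatMap (B : List Int) (n : Int) :
    ∀ (rest : List Int) (ps : List (List Int)),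
      rest.foldl (pvStep B n) ps = ps.flatMap (fun p => rest.foldl (pvStep B n) [p]) := by
  intro rest
  induction rest with
  | nil => intro ps; simp [List.foldl]
  | cons v rest ih =>
    intro ps
    simp only [List.foldl_cons]
    rw [ih, pv_step_flatMap B n ps v, List.flatMap_assoc]
    simp only [← ih]

lemma pv_flatMap_ite_nil {α β : Type} (l : List α) (c : α → Bool) (h : α → List β) :
    l.flatMap (fun x => if c x then [] else h x) = (l.filter (fun x => !c x)).flatMap h := by
  induction l with
  | nil => rfl
  | cons a t ih => by_cases hc : c a <;> simp [List.flatMap_cons, hc, ih]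

-- the heart of the equivalence: A's backtracking over the remaining values equals B's fold,
-- given that the used-set holds exactly the positions already placed in perm
lemma pv_bt_eq (B : List Int) (vti : PySem.Dict Int (List Int))
    (hv : ∀ v, vti.getD v []
        = (PySem.List.pyRange 0 (B.length : Int) 1).filter (fun j => PySem.List.pyGetD B j 0 == v)) :
    ∀ (rest : List Int) (perm : List Int) (used : PySem.Set Int),
      (∀ x, PySem.Set.contains used x = perm.contains x) →
      pvBT vti rest perm used = rest.foldl (pvStep B (B.length : Int)) [perm] := by
  intro rest
  induction rest with
  | nil => intro perm used _; rfl
  | cons v rest ih =>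
    intro perm used hinv
    rw [pvBT, hv v]
    have hb : ∀ (acc : List (List Int)) (pos : Int),
        (if PySem.Set.contains used pos then acc
         else acc ++ pvBT vti rest (perm ++ [pos]) (PySem.Set.add used pos))
        = acc ++ (if PySem.Set.contains used pos then []
                  else pvBT vti rest (perm ++ [pos]) (PySem.Set.add used pos)) := by
      intro acc pos; split <;> simp
    rw [PySem.List.foldl_congr_mem _ _ _ _ (fun acc pos _ => hb acc pos),
        PySem.List.foldl_append_eq_flatMap, pv_flatMap_ite_nil]
    have hbt : ∀ pos : Int, pvBT vti rest (perm ++ [pos]) (PySem.Set.add used pos)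
        = rest.foldl (pvStep B (B.length : Int)) [perm ++ [pos]] := by
      intro pos
      refine ih _ _ (fun x => ?_)
      rw [PySem.Set.add_eq_ite]
      have hxmem : (x ∈ used) ↔ x ∈ perm := by have := hinv x; simpa using this
      by_cases hm : pos ∈ used
      · have hp : (pos ∈ perm) := by
          have := hinv pos; simp [hm] at this; simpa using this
        by_cases hx : x = pos
        · subst hx; simp [hm, hp]
        · simp [hm, hx, hxmem]
      · by_cases hx : x = pos
        · subst hx; simp [hm]
        · simp [hm, hx, hxmem]
    simp only [hbt]
    rw [List.foldl_cons, pv_foldl_step_flatMap]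
    show _ = (pvStep B (B.length : Int) [perm] v).flatMap _
    rw [pvStep]
    simp only [List.flatMap_cons, List.flatMap_nil, List.append_nil, List.flatMap_map]
    rw [List.nil_append]
    refine congrArg _ (List.filter_congr ?_)
    intro j _
    have h : (j ∈ used) ↔ j ∈ perm := by have := hinv j; simpa using this
    simp [h]

-- ===== VERDICT (by name: the statement is the Claim_ definition above) =====
theorem generateSortPermutations_spec : Claim_equal_generateSortPermutations := by
  intro A _
  unfold Spec_generateSortPermutations generateSortPermutations generateSortPermutations_alt
  have hlen : (PySem.List.sorted A (fun x => x) false).length = A.length :=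
    PySem.List.length_sorted A (fun x => x) false
  rw [pv_bt_eq (PySem.List.sorted A (fun x => x) false) _
      (fun v => pv_cand_eq _ v) A [] PySem.Set.empty (fun x => rfl), hlen]
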